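-- pv_equiv track=rewrite | github.com/akinori020321/FastWeights | KV_COS/kv_cos_Anorm/figure/plot_head_clean_heatmap.py | build_cid2color_bvq
-- ===== SOURCE A (Python) =====
-- CLASS_OUTLINE_COLORS = [
--     "#ff4fa3",  # vivid pink
--     "#ff9f1a",  # vivid orange
--     "#4dd9ff",  # bright cyan-blue
--     "#6dff6d",  # bright green
-- ]
--
-- def build_cid2color_bvq(kinds, class_ids):
--     """
--     kind in ("bind","value","query") かつ class_id>=0 を t順に走査し、
--     初出 class_id に順番に色を割り当てる。
--     戻り値: (cid2color, ordered_cids)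
--     """
--     cid2color = {}
--     ordered_cids = []
--     color_idx = 0
--
--     for k, cid in zip(kinds, class_ids):
--         cid = int(cid)
--         if cid < 0:
--             continue
--         if k not in ("bind", "value", "query"):
--             continue
--         if cid in cid2color:
--             continue
--
--         cid2color[cid] = CLASS_OUTLINE_COLORS[color_idx % len(CLASS_OUTLINE_COLORS)]
--         ordered_cids.append(cid)
--         color_idx += 1
--
--     return cid2color, ordered_cids
-- ===== SOURCE B (Python) =====
-- CLASS_OUTLINE_COLORS = [
--     "#ff4fa3",  # vivid pink
--     "#ff9f1a",  # vivid orange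
--     "#4dd9ff",  # bright cyan-blue
--     "#6dff6d",  # bright green
-- ]
--
-- def build_cid2color_bvq(kinds, class_ids):
--     # Stage 1: record, for each valid class id, the index of its FIRST valid occurrence.
--     first = {}
--     for i, (k, cid) in enumerate(zip(kinds, class_ids)):
--         cid = int(cid)
--         if cid >= 0 and k in ("bind", "value", "query"):
--             first.setdefault(cid, i)
--     # Stage 2: order the ids by their first-occurrence index.
--     ordered_cids = sorted(first, key=first.get)
--     # Stage 3: assign the cyclic colors by position.
--     n = len(CLASS_OUTLINE_COLORS)
--     cid2color = {c: CLASS_OUTLINE_COLORS[i % n] for i, c in enumerate(ordered_cids)}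
--     return cid2color, ordered_cids
-- ===== Notes on version B (the rewrite author's own statement) =====
-- stated objective: alternative
-- what changed: Replaces A's single interleaved scan (seen-dict, order list and color counter maintained together) with a first-occurrence-index map built via setdefault, a sort of the ids by that index, and a positional dict comprehension for the colors.
import Mathlib
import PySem

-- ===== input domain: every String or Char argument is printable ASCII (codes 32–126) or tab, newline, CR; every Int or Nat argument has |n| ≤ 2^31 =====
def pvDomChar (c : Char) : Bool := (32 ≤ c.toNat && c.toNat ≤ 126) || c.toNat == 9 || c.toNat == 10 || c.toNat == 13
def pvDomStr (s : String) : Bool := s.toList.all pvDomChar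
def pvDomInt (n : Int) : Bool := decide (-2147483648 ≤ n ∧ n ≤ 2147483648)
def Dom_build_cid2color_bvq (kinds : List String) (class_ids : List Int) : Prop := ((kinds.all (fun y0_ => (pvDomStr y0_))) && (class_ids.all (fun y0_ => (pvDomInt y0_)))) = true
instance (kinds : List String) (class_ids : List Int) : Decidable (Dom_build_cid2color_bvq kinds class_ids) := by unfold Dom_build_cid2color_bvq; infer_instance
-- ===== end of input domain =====

-- B replaces A's single interleaved scan (dict + order list + color counter) by a first-occurrence-index
-- map (setdefault), a sort of the ids by that index, and a positional color mapping; same return value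
-- (objective: alternative).

def CLASS_OUTLINE_COLORS : List String := ["#ff4fa3", "#ff9f1a", "#4dd9ff", "#6dff6d"]

-- ===== PORT A =====
-- A's loop: state (cid2color dict, ordered_cids, color_idx)
def aLoop : List (String × Int) → PySem.Dict Int String → List Int → Int → PySem.Dict Int String × List Int
  | [], d, ord, _ => (d, ord)
  | (k, cid) :: rest, d, ord, i =>
    if cid < 0 then aLoop rest d ord i
    else if ¬(k = "bind" ∨ k = "value" ∨ k = "query") then aLoop rest d ord i
    else if d.contains cid then aLoop rest d ord i
    else aLoop rest
      (d.insert cid (PySem.List.pyGetD CLASS_OUTLINE_COLORS (PySem.Int.mod i (CLASS_OUTLINE_COLORS.length : Int)) ""))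
      (ord ++ [cid]) (i + 1)

def build_cid2color_bvq (kinds : List String) (class_ids : List Int) : (List (Int × String)) × List Int :=
  let r := aLoop (kinds.zip class_ids) PySem.Dict.empty [] 0
  (r.1.items, r.2)

-- ===== PORT B =====
-- B's stage 1: first-occurrence-index map via setdefault over enumerate(zip(...))
def bLoop : List (Int × (String × Int)) → PySem.Dict Int Int → PySem.Dict Int Int
  | [], f => f
  | (i, (k, cid)) :: rest, f =>
    if 0 ≤ cid ∧ (k = "bind" ∨ k = "value" ∨ k = "query") then
      bLoop rest (f.setdefault cid i)
    else bLoop rest f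

def build_cid2color_bvq_alt (kinds : List String) (class_ids : List Int) : (List (Int × String)) × List Int :=
  let first := bLoop (PySem.List.enumerate (kinds.zip class_ids)) PySem.Dict.empty
  -- stage 2: sorted(first, key=first.get)
  let ordered := PySem.List.sorted first.keys (fun c => first.getD c 0) false
  -- stage 3: {c: COLORS[i % n] for i, c in enumerate(ordered)}
  let cid2color := ((PySem.List.enumerate ordered).foldl
      (fun d p => d.insert p.2 (PySem.List.pyGetD CLASS_OUTLINE_COLORS (PySem.Int.mod p.1 (CLASS_OUTLINE_COLORS.length : Int)) ""))
      PySem.Dict.empty).items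
  (cid2color, ordered)

-- ===== PRECONDITION & SPEC =====
def Spec_build_cid2color_bvq (kinds : List String) (class_ids : List Int) (out : (List (Int × String)) × List Int) : Prop := out = build_cid2color_bvq_alt kinds class_ids
instance (kinds : List String) (class_ids : List Int) (out : (List (Int × String)) × List Int) : Decidable (Spec_build_cid2color_bvq kinds class_ids out) := by unfold Spec_build_cid2color_bvq; infer_instance

-- ===== CLAIM (what is proved, stated in full; the proofs are below) =====
def Claim_equal_build_cid2color_bvq : Prop := ∀ (kinds : List String) (class_ids : List Int), Dom_build_cid2color_bvq kinds class_ids → Spec_build_cid2color_bvq kinds class_ids (build_cid2color_bvq kinds class_ids)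

-- ===== LEMMAS AND PROOFS =====

-- the cyclic color list, as a function of the ordered id list
def colorMap (ord : List Int) : List (Int × String) :=
  (PySem.List.enumerate ord).map
    (fun p => (p.2, PySem.List.pyGetD CLASS_OUTLINE_COLORS (PySem.Int.mod p.1 (CLASS_OUTLINE_COLORS.length : Int)) ""))

lemma colorMap_append (ord : List Int) (c : Int) :
    colorMap (ord ++ [c]) = colorMap ord ++
      [(c, PySem.List.pyGetD CLASS_OUTLINE_COLORS (PySem.Int.mod (ord.length : Int) (CLASS_OUTLINE_COLORS.length : Int)) "")] := by
  simp [colorMap, PySem.List.enumerate_append, PySem.List.enumerate_cons, PySem.List.enumerate_nil]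

-- the joint invariant: A's scan and B's first-index scan walk in lockstep;
-- f.keys is A's ordered list, d.items is the color map of f.keys, f's stored indices are
-- strictly increasing and below every index still to come.
lemma loops_eq : ∀ (epairs : List (Int × (String × Int))) (d : PySem.Dict Int String) (f : PySem.Dict Int Int),
    (∀ c : Int, d.contains c = f.contains c) →
    d.items = colorMap f.keys →
    f.keys.Nodup →
    f.items.Pairwise (fun p q => p.2 < q.2) →
    (∀ p ∈ f.items, ∀ q ∈ epairs, p.2 < q.1) →
    epairs.Pairwise (fun p q => p.1 < q.1) →
    (aLoop (epairs.map (fun e => e.2)) d f.keys (f.keys.length : Int)).1.items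
        = colorMap (bLoop epairs f).keys ∧
    (aLoop (epairs.map (fun e => e.2)) d f.keys (f.keys.length : Int)).2 = (bLoop epairs f).keys ∧
    (bLoop epairs f).keys.Nodup ∧
    (bLoop epairs f).items.Pairwise (fun p q => p.2 < q.2) := by
  intro epairs
  induction epairs with
  | nil =>
    intro d f h1 h2 h3 h4 _ _
    exact ⟨by simpa [aLoop, bLoop] using h2, by simp [aLoop, bLoop], h3, h4⟩
  | cons e rest ih =>
    intro d f h1 h2 h3 h4 h5 h6
    obtain ⟨i, k, cid⟩ := e
    have h5r : ∀ p ∈ f.items, ∀ q ∈ rest, p.2 < q.1 := by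
      intro p hp q hq; exact h5 p hp q (List.mem_cons_of_mem _ hq)
    have h6r : rest.Pairwise (fun p q => p.1 < q.1) := h6.of_cons
    by_cases hneg : cid < 0
    · have hb : ¬(0 ≤ cid ∧ (k = "bind" ∨ k = "value" ∨ k = "query")) := fun h => absurd h.1 (by omega)
      simp only [List.map_cons, aLoop, bLoop, if_pos hneg, if_neg hb]
      exact ih d f h1 h2 h3 h4 h5r h6r
    · by_cases hk : (k = "bind" ∨ k = "value" ∨ k = "query")
      · have hbcond : (0 ≤ cid ∧ (k = "bind" ∨ k = "value" ∨ k = "query")) := ⟨by omega, hk⟩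
        by_cases hc : f.contains cid = true
        · have hsd : f.setdefault cid i = f := PySem.Dict.setdefault_of_contains f i hc
          have hdc : d.contains cid = true := by rw [h1]; exact hc
          simp only [List.map_cons, aLoop, bLoop, if_neg hneg, if_neg (not_not_intro hk),
            if_pos hdc, if_pos hbcond, hsd]
          exact ih d f h1 h2 h3 h4 h5r h6r
        · have hc' : f.contains cid = false := by simpa using hc
          have hsd : f.setdefault cid i = f.insert cid i := PySem.Dict.setdefault_of_not_contains f i hc'
          have hkeys : (f.insert cid i).keys = f.keys ++ [cid] :=
            PySem.Dict.keys_insert_of_not_contains f i hc'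
          have hitems : (f.insert cid i).items = f.items ++ [(cid, i)] :=
            PySem.Dict.items_insert_of_not_contains f i hc'
          have hcidmem : cid ∉ f.keys := by
            intro hmem
            exact absurd ((PySem.Dict.contains_iff_mem_keys _ _).mpr hmem) hc
          -- new A-dict
          set v := PySem.List.pyGetD CLASS_OUTLINE_COLORS (PySem.Int.mod (f.keys.length : Int) (CLASS_OUTLINE_COLORS.length : Int)) "" with hv
          have hd1 : ∀ c : Int, (d.insert cid v).contains c = (f.insert cid i).contains c := by
            intro c
            rw [PySem.Dict.contains_insert, PySem.Dict.contains_insert, h1]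
          have hdc : d.contains cid = false := by rw [h1]; exact hc'
          have hd2 : (d.insert cid v).items = colorMap ((f.insert cid i).keys) := by
            rw [PySem.Dict.items_insert_of_not_contains d v hdc, h2, hkeys, colorMap_append]
          have hn3 : (f.insert cid i).keys.Nodup := by
            rw [hkeys]; refine List.Nodup.append h3 (List.nodup_singleton _) ?_
            intro a ha hb
            simp only [List.mem_singleton] at hb
            exact hcidmem (hb ▸ ha)
          have hn4 : (f.insert cid i).items.Pairwise (fun p q => p.2 < q.2) := by
            rw [hitems]
            refine List.pairwise_append.mpr ⟨h4, List.pairwise_singleton _ _, ?_⟩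
            intro p hp q hq
            have := h5 p hp (i, (k, cid)) (List.mem_cons_self)
            simp only [List.mem_singleton] at hq
            subst hq; exact this
          have hn5 : ∀ p ∈ (f.insert cid i).items, ∀ q ∈ rest, p.2 < q.1 := by
            rw [hitems]
            intro p hp q hq
            rcases List.mem_append.mp hp with hp | hp
            · exact h5r p hp q hq
            · simp only [List.mem_singleton] at hp
              subst hp
              have := (List.pairwise_cons.mp h6).1 q hq
              simpa using this
          simp only [List.map_cons, aLoop, bLoop, if_neg hneg, if_neg (not_not_intro hk),
            if_neg (by simp [hdc] : ¬ d.contains cid = true), if_pos hbcond, hsd, ← hv]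
          have := ih (d.insert cid v) (f.insert cid i) hd1 hd2 hn3 hn4 hn5 h6r
          rw [hkeys] at this
          simpa [List.length_append, hkeys] using this
      · have hb : ¬(0 ≤ cid ∧ (k = "bind" ∨ k = "value" ∨ k = "query")) := fun h => hk h.2
        simp only [List.map_cons, aLoop, bLoop, if_neg hneg, if_pos hk, if_neg hb]
        exact ih d f h1 h2 h3 h4 h5r h6r

-- sorting the keys by their stored first index is the identity when the stored indices
-- increase along the key list
lemma sorted_keys_eq (f : PySem.Dict Int Int)
    (hnd : f.keys.Nodup) (hpw : f.items.Pairwise (fun p q => p.2 < q.2)) :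
    PySem.List.sorted f.keys (fun c => f.getD c 0) false = f.keys := by
  apply PySem.List.sorted_eq_of_perm_of_pairwise_lt _ _ _ (List.Perm.refl _)
  have : f.items.Pairwise (fun p q => f.getD p.1 0 < f.getD q.1 0) := by
    refine hpw.imp_of_mem ?_
    intro p q hp hq hlt
    obtain ⟨p1, p2⟩ := p
    obtain ⟨q1, q2⟩ := q
    rw [PySem.Dict.getD_of_mem_items f hp hnd 0, PySem.Dict.getD_of_mem_items f hq hnd 0]
    exact hlt
  simpa [PySem.Dict.keys, List.pairwise_map] using this

-- ===== VERDICT (by name: the statement is the Claim_ definition above) =====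
theorem build_cid2color_bvq_spec : Claim_equal_build_cid2color_bvq := by
  intro kinds class_ids _
  unfold Spec_build_cid2color_bvq build_cid2color_bvq build_cid2color_bvq_alt
  have hmap : (PySem.List.enumerate (kinds.zip class_ids)).map (fun e => e.2) = kinds.zip class_ids :=
    PySem.List.map_snd_enumerate _ _
  have h := loops_eq (PySem.List.enumerate (kinds.zip class_ids)) PySem.Dict.empty PySem.Dict.empty
    (by intro c; simp)
    (by simp [colorMap, PySem.Dict.empty, PySem.List.enumerate_nil])
    (by simp [PySem.Dict.empty, PySem.Dict.keys])
    (by simp [PySem.Dict.empty])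
    (by simp [PySem.Dict.empty])
    (PySem.List.pairwise_lt_enumerate _ _)
  rw [hmap] at h
  simp only [PySem.Dict.keys_empty, List.length_nil, Int.natCast_zero] at h
  obtain ⟨hA1, hA2, hnd, hpw⟩ := h
  set F := bLoop (PySem.List.enumerate (kinds.zip class_ids)) PySem.Dict.empty with hF
  have hsort : PySem.List.sorted F.keys (fun c => F.getD c 0) false = F.keys :=
    sorted_keys_eq F hnd hpw
  have hcolor :
      ((PySem.List.enumerate F.keys).foldl
        (fun d p => d.insert p.2 (PySem.List.pyGetD CLASS_OUTLINE_COLORS (PySem.Int.mod p.1 (CLASS_OUTLINE_COLORS.length : Int)) ""))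
        PySem.Dict.empty).items = colorMap F.keys := by
    have := PySem.Dict.items_foldl_insert_fresh
      (l := PySem.List.enumerate F.keys) (k := fun p => p.2)
      (v := fun p => PySem.List.pyGetD CLASS_OUTLINE_COLORS (PySem.Int.mod p.1 (CLASS_OUTLINE_COLORS.length : Int)) "")
      (d := PySem.Dict.empty)
      (by intro a _; simp)
      (by rw [PySem.List.map_snd_enumerate]; exact hnd)
    simpa [colorMap] using this
  simp only [hsort, hcolor]
  exact Prod.ext hA1 hA2
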